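-- pv_equiv track=rewrite | github.com/AnnNguy3n/TienLenMienNam | gym_TLMN/envs/agents/Phong.py | list_sc_single
-- ===== SOURCE A (Python) =====
-- def list_sc_single(list_sc_dict):
--     list_sc = list(set(list_sc_dict) - set(x for x in list_sc_dict if list_sc_dict.count(x) > 1))
--     list_sc_copy = list_sc.copy()
--
--     #tìm bài lẻ ở trên bàn
--     if 12 in list_sc_copy:
--         list_sc_copy.remove(12)
--     list_doi = set(x for x in list_sc_dict if list_sc_dict.count(x) == 2)
--     for score in list_sc_copy:
--         if (score+1 in list_sc_dict) and (score+2 in list_sc_dict):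
--             list_sc.remove(score)
--         elif (score+1 in list_sc_dict) and (score-1 in list_sc_dict):
--             list_sc.remove(score)
--         elif (score-1 in list_sc_dict) and (score-2 in list_sc_dict):
--             list_sc.remove(score)
--
--     for score in set(list_sc_dict):
--         if (score+1 in list_sc_dict) and (score+2 in list_sc_dict):
--             if score in list_doi: list_sc.append(score)
--         elif (score+1 in list_sc_dict) and (score-1 in list_sc_dict):
--             if score in list_doi: list_sc.append(score)
--         elif (score-1 in list_sc_dict) and (score-2 in list_sc_dict):
--             if score in list_doi: list_sc.append(score)
--     # in các lá bài trên tay là danh sách điểm của các bài lẻ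
--     list_sc = sorted(list_sc)
--     return list_sc
-- ===== SOURCE B (Python) =====
-- def list_sc_single(list_sc_dict):
--     present = set(list_sc_dict)
--
--     def in_run(s):
--         return ((s + 1 in present and s + 2 in present)
--                 or (s + 1 in present and s - 1 in present)
--                 or (s - 1 in present and s - 2 in present))
--
--     out = []
--     for s in sorted(present):
--         c = list_sc_dict.count(s)
--         if (c == 1 and (s == 12 or not in_run(s))) or (c == 2 and in_run(s)):
--             out.append(s)
--     return out
-- ===== Notes on version B (the rewrite author's own statement) =====
-- stated objective: simpler
-- what changed: Replaces A's set-difference plus two mutating remove/append passes with a single constructive classification pass over the sorted distinct scores (count==1 kept unless in a run, 12 always kept, count==2 added when in a run).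
import Mathlib
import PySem

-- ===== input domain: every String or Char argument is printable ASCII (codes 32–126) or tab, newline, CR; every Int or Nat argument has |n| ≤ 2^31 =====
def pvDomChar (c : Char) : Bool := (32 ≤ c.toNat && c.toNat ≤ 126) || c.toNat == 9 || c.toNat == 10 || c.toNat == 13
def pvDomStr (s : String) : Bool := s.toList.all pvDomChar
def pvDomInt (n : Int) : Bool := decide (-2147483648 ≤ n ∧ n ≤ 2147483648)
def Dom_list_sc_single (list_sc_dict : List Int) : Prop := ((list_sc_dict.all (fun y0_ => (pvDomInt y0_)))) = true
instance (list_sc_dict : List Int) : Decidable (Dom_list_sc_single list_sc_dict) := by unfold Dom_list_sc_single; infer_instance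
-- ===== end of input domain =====

-- B replaces A's set-difference plus two mutating remove/append passes by one
-- classification pass over the sorted distinct scores (objective: simpler).


-- ===== PORT A =====
def list_sc_single (list_sc_dict : List Int) : List Int :=
  -- list(set(d) - set(x for x in d if d.count(x) > 1))
  let list_sc : List Int := PySem.Set.diff (PySem.Set.ofList list_sc_dict)
      (PySem.Set.ofList (list_sc_dict.filter (fun x => decide (1 < PySem.List.count list_sc_dict x))))
  -- if 12 in list_sc_copy: list_sc_copy.remove(12)  (remove(12) is reached only when 12 is a member,
  -- so remove? is some there; .getD is only the never-taken none branch)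
  let list_sc_copy : List Int :=
    if (12 : Int) ∈ list_sc then (PySem.List.remove? list_sc 12).getD list_sc else list_sc
  let list_doi : List Int :=
    PySem.Set.ofList (list_sc_dict.filter (fun x => PySem.List.count list_sc_dict x == 2))
  -- first loop: list_sc.remove(score); score occurs at most once in list_sc, remove? is some whenever
  -- score ∈ list_sc and .getD gives Python's no-op only when the element is absent (never happens: copy ⊆ list_sc)
  let list_sc : List Int := list_sc_copy.foldl (fun acc score =>
      if (score+1) ∈ list_sc_dict ∧ (score+2) ∈ list_sc_dict then (PySem.List.remove? acc score).getD acc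
      else if (score+1) ∈ list_sc_dict ∧ (score-1) ∈ list_sc_dict then (PySem.List.remove? acc score).getD acc
      else if (score-1) ∈ list_sc_dict ∧ (score-2) ∈ list_sc_dict then (PySem.List.remove? acc score).getD acc
      else acc) list_sc
  -- second loop, over set(list_sc_dict)
  let list_sc : List Int := (PySem.Set.ofList list_sc_dict).foldl (fun acc score =>
      if (score+1) ∈ list_sc_dict ∧ (score+2) ∈ list_sc_dict then
        (if score ∈ list_doi then acc ++ [score] else acc)
      else if (score+1) ∈ list_sc_dict ∧ (score-1) ∈ list_sc_dict then
        (if score ∈ list_doi then acc ++ [score] else acc)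
      else if (score-1) ∈ list_sc_dict ∧ (score-2) ∈ list_sc_dict then
        (if score ∈ list_doi then acc ++ [score] else acc)
      else acc) list_sc
  PySem.List.sorted list_sc (fun x => x)

-- ===== PORT B =====
def pvInRun (present : PySem.Set Int) (s : Int) : Bool :=
  decide (((s+1) ∈ present ∧ (s+2) ∈ present) ∨ ((s+1) ∈ present ∧ (s-1) ∈ present)
          ∨ ((s-1) ∈ present ∧ (s-2) ∈ present))

def list_sc_single_alt (list_sc_dict : List Int) : List Int :=
  let present : PySem.Set Int := PySem.Set.ofList list_sc_dict
  (PySem.List.sorted present (fun x => x)).foldl (fun out s =>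
    let c := PySem.List.count list_sc_dict s
    if (c = 1 ∧ (s = 12 ∨ ¬ pvInRun present s = true)) ∨ (c = 2 ∧ pvInRun present s = true)
    then out ++ [s] else out) []

-- ===== PRECONDITION & SPEC =====
def Spec_list_sc_single (list_sc_dict : List Int) (out : List Int) : Prop := out = list_sc_single_alt list_sc_dict
instance (list_sc_dict : List Int) (out : List Int) : Decidable (Spec_list_sc_single list_sc_dict out) := by unfold Spec_list_sc_single; infer_instance

-- ===== CLAIM (what is proved, stated in full; the proofs are below) =====
def Claim_equal_list_sc_single : Prop := ∀ (list_sc_dict : List Int), Dom_list_sc_single list_sc_dict → Spec_list_sc_single list_sc_dict (list_sc_single list_sc_dict)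

-- ===== LEMMAS AND PROOFS =====

lemma removeD_eq_erase (l : List Int) (v : Int) :
    (PySem.List.remove? l v).getD l = l.erase v := by
  by_cases h : v ∈ l
  · rw [PySem.List.remove?_eq_some_erase l v h]; rfl
  · rw [(PySem.List.remove?_eq_none_iff l v).mpr h, List.erase_of_not_mem h]; rfl

lemma stepA1_eq (d : List Int) :
    (fun (acc : List Int) score =>
      if (score+1) ∈ d ∧ (score+2) ∈ d then (PySem.List.remove? acc score).getD acc
      else if (score+1) ∈ d ∧ (score-1) ∈ d then (PySem.List.remove? acc score).getD acc
      else if (score-1) ∈ d ∧ (score-2) ∈ d then (PySem.List.remove? acc score).getD acc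
      else acc)
    = (fun acc score => if pvInRun (PySem.Set.ofList d) score then acc.erase score else acc) := by
  funext acc s
  by_cases h1 : (s+1) ∈ d ∧ (s+2) ∈ d <;>
  by_cases h2 : (s+1) ∈ d ∧ (s-1) ∈ d <;>
  by_cases h3 : (s-1) ∈ d ∧ (s-2) ∈ d <;>
    simp [h1, h2, h3, removeD_eq_erase, pvInRun, PySem.Set.mem_ofList]

lemma stepA2_eq (d doi : List Int) :
    (fun (acc : List Int) score =>
      if (score+1) ∈ d ∧ (score+2) ∈ d then (if score ∈ doi then acc ++ [score] else acc)
      else if (score+1) ∈ d ∧ (score-1) ∈ d then (if score ∈ doi then acc ++ [score] else acc)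
      else if (score-1) ∈ d ∧ (score-2) ∈ d then (if score ∈ doi then acc ++ [score] else acc)
      else acc)
    = (fun acc score =>
        if pvInRun (PySem.Set.ofList d) score = true ∧ score ∈ doi then acc ++ [score] else acc) := by
  funext acc s
  by_cases h1 : (s+1) ∈ d ∧ (s+2) ∈ d <;>
  by_cases h2 : (s+1) ∈ d ∧ (s-1) ∈ d <;>
  by_cases h3 : (s-1) ∈ d ∧ (s-2) ∈ d <;>
  by_cases hd : s ∈ doi <;>
    simp [h1, h2, h3, hd, pvInRun, PySem.Set.mem_ofList]

lemma foldl_erase_eq_filter (q : Int → Bool) :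
    ∀ (l acc : List Int), acc.Nodup →
      l.foldl (fun a s => if q s then a.erase s else a) acc
        = acc.filter (fun x => !(decide (x ∈ l) && q x)) := by
  intro l
  induction l with
  | nil => intro acc _; simp
  | cons s l ih =>
    intro acc h
    simp only [List.foldl_cons]
    by_cases hq : q s = true
    · rw [if_pos hq, ih _ ((List.Nodup.erase s) h), List.Nodup.erase_eq_filter h, List.filter_filter]
      apply List.filter_congr; intro x _
      by_cases hxs : x = s <;> simp [hxs, hq]
    · rw [if_neg hq, ih _ h]
      apply List.filter_congr; intro x _
      by_cases hxs : x = s <;> simp [hxs, hq]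

lemma foldl_append_ifP (p : Int → Prop) [DecidablePred p] :
    ∀ (l acc : List Int),
      l.foldl (fun a s => if p s then a ++ [s] else a) acc
        = acc ++ l.filter (fun s => decide (p s)) := by
  intro l
  induction l with
  | nil => intro acc; simp
  | cons s l ih =>
    intro acc
    simp only [List.foldl_cons]
    by_cases h : p s <;> simp [h, ih]

-- the one-pass classification predicate of B
def predB (d : List Int) (s : Int) : Bool :=
  decide ((PySem.List.count d s = 1 ∧ (s = 12 ∨ ¬ pvInRun (PySem.Set.ofList d) s = true))
          ∨ (PySem.List.count d s = 2 ∧ pvInRun (PySem.Set.ofList d) s = true))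

lemma alt_eq_filter (d : List Int) :
    list_sc_single_alt d
      = (PySem.List.sorted (PySem.Set.ofList d) (fun x => x)).filter (predB d) := by
  show (PySem.List.sorted (PySem.Set.ofList d) (fun x => x)).foldl _ [] = _
  rw [foldl_append_ifP (fun s => (PySem.List.count d s = 1 ∧ (s = 12 ∨ ¬ pvInRun (PySem.Set.ofList d) s = true)) ∨ (PySem.List.count d s = 2 ∧ pvInRun (PySem.Set.ofList d) s = true))]
  rw [List.nil_append]
  apply List.filter_congr
  intro x _
  simp [predB]

-- A's singletons: distinct scores of count 1
def singlesOf (d : List Int) : List Int :=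
  PySem.Set.diff (PySem.Set.ofList d)
    (PySem.Set.ofList (d.filter (fun x => decide (1 < PySem.List.count d x))))

def copyOf (d : List Int) : List Int :=
  if (12 : Int) ∈ singlesOf d then (singlesOf d).erase 12 else singlesOf d

def doiOf (d : List Int) : List Int :=
  PySem.Set.ofList (d.filter (fun x => PySem.List.count d x == 2))

-- the (unsorted) list A holds just before the final sorted()
def AlistOf (d : List Int) : List Int :=
  (singlesOf d).filter (fun x => !(decide (x ∈ copyOf d) && pvInRun (PySem.Set.ofList d) x))
    ++ (PySem.Set.ofList d).filter
        (fun s => decide (pvInRun (PySem.Set.ofList d) s = true ∧ s ∈ doiOf d))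

lemma nodup_singlesOf (d : List Int) : (singlesOf d).Nodup := by
  unfold singlesOf
  exact List.Nodup.filter _ (PySem.Set.nodup_ofList d)

lemma mem_singlesOf (d : List Int) (x : Int) :
    x ∈ singlesOf d ↔ x ∈ d ∧ List.count x d = 1 := by
  unfold singlesOf
  rw [PySem.Set.mem_diff]
  simp only [PySem.Set.mem_ofList, List.mem_filter, PySem.List.count_eq, decide_eq_true_iff]
  constructor
  · rintro ⟨hx, hn⟩
    have hpos : 0 < List.count x d := List.count_pos_iff.mpr hx
    have : ¬ 1 < List.count x d := fun h => hn ⟨hx, h⟩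
    exact ⟨hx, by omega⟩
  · rintro ⟨hx, hc⟩
    exact ⟨hx, fun h => by omega⟩

lemma mem_copyOf (d : List Int) (x : Int) :
    x ∈ copyOf d ↔ x ∈ singlesOf d ∧ x ≠ 12 := by
  unfold copyOf
  split_ifs with h12
  · rw [List.Nodup.mem_erase_iff (nodup_singlesOf d)]; tauto
  · constructor
    · intro hx; exact ⟨hx, fun he => h12 (he ▸ hx)⟩
    · tauto

lemma mem_doiOf (d : List Int) (x : Int) :
    x ∈ doiOf d ↔ x ∈ d ∧ List.count x d = 2 := by
  unfold doiOf
  simp [PySem.Set.mem_ofList, List.mem_filter, PySem.List.count_eq]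

lemma portA_eq (d : List Int) :
    list_sc_single d = PySem.List.sorted (AlistOf d) (fun x => x) := by
  unfold list_sc_single
  simp only []
  rw [stepA1_eq, stepA2_eq, removeD_eq_erase]
  rw [show ((PySem.Set.ofList d).diff (PySem.Set.ofList (List.filter (fun x => decide (1 < PySem.List.count d x)) d))) = singlesOf d from rfl]
  rw [show (if (12:Int) ∈ singlesOf d then (singlesOf d).erase 12 else singlesOf d) = copyOf d from rfl]
  rw [show (PySem.Set.ofList (List.filter (fun x => PySem.List.count d x == 2) d)) = doiOf d from rfl]
  rw [foldl_erase_eq_filter (pvInRun (PySem.Set.ofList d)) (copyOf d) (singlesOf d) (nodup_singlesOf d)]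
  rw [foldl_append_ifP (fun s => pvInRun (PySem.Set.ofList d) s = true ∧ s ∈ doiOf d)]
  rfl

lemma mem_AlistOf (d : List Int) (x : Int) :
    x ∈ AlistOf d ↔ x ∈ d ∧
      ((List.count x d = 1 ∧ (x = 12 ∨ pvInRun (PySem.Set.ofList d) x = false))
        ∨ (List.count x d = 2 ∧ pvInRun (PySem.Set.ofList d) x = true)) := by
  unfold AlistOf
  simp only [List.mem_append, List.mem_filter, mem_singlesOf, mem_copyOf, mem_doiOf,
    PySem.Set.mem_ofList, Bool.not_eq_true', Bool.and_eq_false_iff, decide_eq_true_iff,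
    decide_eq_false_iff_not, not_and, ne_eq, not_not]
  constructor
  · rintro (⟨⟨hx, hc⟩, hk⟩ | ⟨hx, hr, _, hc⟩)
    · refine ⟨hx, Or.inl ⟨hc, ?_⟩⟩
      by_cases h12 : x = 12
      · exact Or.inl h12
      · tauto
    · exact ⟨hx, Or.inr ⟨hc, hr⟩⟩
  · rintro ⟨hx, ⟨hc, hk⟩ | ⟨hc, hr⟩⟩
    · refine Or.inl ⟨⟨hx, hc⟩, ?_⟩
      tauto
    · exact Or.inr ⟨hx, hr, hx, hc⟩

lemma nodup_AlistOf (d : List Int) : (AlistOf d).Nodup := by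
  unfold AlistOf
  rw [List.nodup_append]
  refine ⟨List.Nodup.filter _ (nodup_singlesOf d),
    List.Nodup.filter _ (PySem.Set.nodup_ofList d), ?_⟩
  intro a ha b hb heq
  subst heq
  rw [List.mem_filter] at ha hb
  have h1 := (mem_singlesOf d a).mp ha.1
  have h2p : pvInRun (PySem.Set.ofList d) a = true ∧ a ∈ doiOf d := by
    have := hb.2; simpa using this
  have h2 := (mem_doiOf d a).mp h2p.2
  omega

lemma main_eq (d : List Int) : list_sc_single d = list_sc_single_alt d := by
  rw [portA_eq, alt_eq_filter]
  have hpw : (List.filter (predB d) (PySem.List.sorted (PySem.Set.ofList d) (fun x => x))).Pairwise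
      (fun a b : Int => a < b) :=
    List.Pairwise.sublist List.filter_sublist (PySem.List.sorted_ofList_pairwise_lt d)
  have hnodupB : (List.filter (predB d) (PySem.List.sorted (PySem.Set.ofList d) (fun x => x))).Nodup :=
    hpw.imp (fun h => ne_of_lt h)
  have hperm : (List.filter (predB d) (PySem.List.sorted (PySem.Set.ofList d) (fun x => x))).Perm
      (AlistOf d) := by
    rw [List.perm_ext_iff_of_nodup hnodupB (nodup_AlistOf d)]
    intro a
    rw [List.mem_filter, PySem.List.mem_sorted, PySem.Set.mem_ofList, mem_AlistOf]
    simp only [predB, PySem.List.count_eq, decide_eq_true_iff, Bool.not_eq_true]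
  exact PySem.List.sorted_eq_of_perm_of_pairwise_lt _ _ _ hperm hpw

-- ===== VERDICT (by name: the statement is the Claim_ definition above) =====
theorem list_sc_single_spec : Claim_equal_list_sc_single := by
  intro d _
  show _ = _
  exact main_eq d
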